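-- pv_equiv track=rewrite | github.com/AngelCamargo404/scheduling-lezat-backend | app/services/action_item_sync_service.py | sanitize_action_item_participants
-- ===== SOURCE A (Python) =====
-- def sanitize_action_item_participants(participant_emails: list[str]) -> list[str]:
--     unique: set[str] = set()
--     for email in participant_emails:
--         cleaned = email.strip().lower()
--         if not cleaned or "@" not in cleaned:
--             continue
--         unique.add(cleaned)
--     return sorted(unique)
-- ===== SOURCE B (Python) =====
-- def sanitize_action_item_participants(participant_emails: list[str]) -> list[str]:
--     # Maintain `result` as a sorted, duplicate-free list at all times:
--     # each cleaned email is inserted at its position (or skipped if present),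
--     # so no set and no final sort are needed.
--     result: list[str] = []
--     for email in participant_emails:
--         c = email.strip().lower()
--         if not c or "@" not in c:
--             continue
--         i = 0
--         while i < len(result) and result[i] < c:
--             i += 1
--         if i == len(result) or result[i] != c:
--             result.insert(i, c)
--     return result
-- ===== Notes on version B (the rewrite author's own statement) =====
-- stated objective: alternative
-- what changed: Replaces hash-set accumulation followed by a sort with an online insertion into a list kept sorted and duplicate-free throughout: each cleaned email is placed at its ordered position (or skipped if already present), so no set and no sort call exist.
import Mathlib
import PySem

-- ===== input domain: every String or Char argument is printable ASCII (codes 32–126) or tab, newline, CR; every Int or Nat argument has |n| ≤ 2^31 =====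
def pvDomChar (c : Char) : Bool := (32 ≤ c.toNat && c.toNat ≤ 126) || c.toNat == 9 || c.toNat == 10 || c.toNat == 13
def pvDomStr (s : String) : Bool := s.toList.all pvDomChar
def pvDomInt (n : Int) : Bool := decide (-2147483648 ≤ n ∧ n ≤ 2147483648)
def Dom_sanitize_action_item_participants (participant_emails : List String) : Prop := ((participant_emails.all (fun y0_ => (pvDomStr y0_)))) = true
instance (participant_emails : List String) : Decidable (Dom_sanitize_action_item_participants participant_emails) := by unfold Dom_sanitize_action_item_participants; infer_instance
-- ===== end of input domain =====

-- B replaces A's set-then-sort with an online ordered insertion: the result list is kept sorted and duplicate-free throughout, no set and no sort call.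

-- ===== PORT A =====
-- email.strip().lower(), shared by both sources verbatim
def pvClean (email : String) : String := PySem.Str.lower (PySem.Str.strip email)

def sanitize_action_item_participants (participant_emails : List String) : List String :=
  let unique : PySem.Set String :=
    participant_emails.foldl (fun u email =>
      let cleaned := pvClean email
      if cleaned == "" || !(PySem.Str.isIn "@" cleaned) then u
      else PySem.Set.add u cleaned) PySem.Set.empty
  PySem.List.sorted unique (fun x => x) false

-- ===== PORT B =====
-- B's inner while+insert: scan past elements < c, then insert c unless already there
def pvIns : List String → String → List String
  | [], c => [c]
  | h :: t, c => if h < c then h :: pvIns t c else if c == h then h :: t else c :: h :: t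

def sanitize_action_item_participants_alt (participant_emails : List String) : List String :=
  participant_emails.foldl (fun res email =>
    let c := pvClean email
    if c == "" || !(PySem.Str.isIn "@" c) then res
    else pvIns res c) []

-- ===== PRECONDITION & SPEC =====
def Spec_sanitize_action_item_participants (participant_emails : List String) (out : List String) : Prop := out = sanitize_action_item_participants_alt participant_emails
instance (participant_emails : List String) (out : List String) : Decidable (Spec_sanitize_action_item_participants participant_emails out) := by unfold Spec_sanitize_action_item_participants; infer_instance

-- ===== CLAIM (what is proved, stated in full; the proofs are below) =====
def Claim_equal_sanitize_action_item_participants : Prop := ∀ (participant_emails : List String), Dom_sanitize_action_item_participants participant_emails → Spec_sanitize_action_item_participants participant_emails (sanitize_action_item_participants participant_emails)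

-- ===== LEMMAS AND PROOFS =====

-- the keep-condition of both programs, as one Bool
def pvKeep (email : String) : Bool := !(pvClean email == "") && PySem.Str.isIn "@" (pvClean email)

-- generic: a conditional-accumulate loop over es equals folding g over the kept, mapped list
lemma pv_filter_fold {A B : Type} (p : A → Bool) (f : A → B) (g : List B → B → List B) :
    ∀ (es : List A) (u : List B),
      es.foldl (fun u e => if p e then g u (f e) else u) u
      = ((es.filter p).map f).foldl g u := by
  intro es
  induction es with
  | nil => intro u; rfl
  | cons e es ih =>
    intro u
    cases hp : p e <;> simp [List.foldl, hp, ih]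

-- both loop bodies are the same conditional-accumulate shape
lemma pv_body_eq (g : List String → String → List String) :
    (fun (u : List String) email =>
      let cleaned := pvClean email
      if cleaned == "" || !(PySem.Str.isIn "@" cleaned) then u
      else g u cleaned)
    = fun u e => if pvKeep e then g u (pvClean e) else u := by
  funext u e
  cases h1 : (pvClean e == "") <;>
    cases h2 : PySem.Chars.isIn ['@'] (pvClean e).toList <;>
    simp [pvKeep, PySem.Str.isIn, h1, h2]

-- membership after insertion
lemma pv_mem_ins : ∀ (l : List String) (c z : String), z ∈ pvIns l c ↔ z = c ∨ z ∈ l := by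
  intro l c
  induction l with
  | nil => intro z; simp [pvIns]
  | cons h t ih =>
    intro z
    by_cases h1 : h < c
    · simp only [pvIns, if_pos h1, List.mem_cons, ih]
      tauto
    · by_cases h2 : c = h
      · simp [pvIns, h2]
      · have : (c == h) = false := by simp [h2]
        simp [pvIns, h1, this]

-- insertion preserves strict sortedness
lemma pv_ins_pairwise : ∀ (l : List String) (c : String),
    l.Pairwise (· < ·) → (pvIns l c).Pairwise (· < ·) := by
  intro l c
  induction l with
  | nil => intro _; simp [pvIns]
  | cons h t ih =>
    intro hp
    have hht : ∀ x ∈ t, h < x := (List.pairwise_cons.mp hp).1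
    have ht : t.Pairwise (· < ·) := hp.of_cons
    by_cases h1 : h < c
    · simp only [pvIns, if_pos h1]
      refine List.pairwise_cons.mpr ⟨?_, ih ht⟩
      intro x hx
      rcases (pv_mem_ins t c x).mp hx with rfl | hx
      · exact h1
      · exact hht x hx
    · by_cases h2 : c = h
      · simpa [pvIns, h1, h2] using hp
      · have hcb : (c == h) = false := by simp [h2]
        have hch : c < h := lt_of_le_of_ne (not_lt.mp h1) h2
        simp only [pvIns, if_neg h1, hcb]
        refine List.pairwise_cons.mpr ⟨?_, hp⟩
        intro x hx
        rcases List.mem_cons.mp hx with rfl | hx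
        · exact hch
        · exact lt_trans hch (hht x hx)

-- the fold over pvIns keeps the list strictly sorted with the accumulated members
lemma pv_fold_ins : ∀ (F res : List String), res.Pairwise (· < ·) →
    ((F.foldl pvIns res).Pairwise (· < ·) ∧
      ∀ z, z ∈ F.foldl pvIns res ↔ z ∈ res ∨ z ∈ F) := by
  intro F
  induction F with
  | nil => intro res hres; exact ⟨hres, by simp⟩
  | cons c F ih =>
    intro res hres
    obtain ⟨h1, h2⟩ := ih (pvIns res c) (pv_ins_pairwise res c hres)
    refine ⟨h1, fun z => ?_⟩
    rw [List.foldl_cons] at *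
    rw [h2 z, pv_mem_ins]
    simp [List.mem_cons]
    tauto

-- ===== VERDICT (by name: the statement is the Claim_ definition above) =====
theorem sanitize_action_item_participants_spec : Claim_equal_sanitize_action_item_participants := by
  intro es _
  unfold Spec_sanitize_action_item_participants
  unfold sanitize_action_item_participants sanitize_action_item_participants_alt
  simp only []
  rw [pv_body_eq PySem.Set.add, pv_body_eq pvIns, pv_filter_fold, pv_filter_fold]
  have hempty : (PySem.Set.empty : PySem.Set String) = [] := rfl
  rw [hempty, ← PySem.Set.ofList_eq_foldl]
  set F := (es.filter pvKeep).map pvClean with hF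
  obtain ⟨h1, h2⟩ := pv_fold_ins F [] List.Pairwise.nil
  set out := F.foldl pvIns [] with hout
  have hmem : ∀ z, z ∈ out ↔ z ∈ PySem.Set.ofList F := by
    intro z
    rw [h2 z, PySem.Set.mem_ofList]
    simp
  have hnodup : out.Nodup := h1.imp (fun h => ne_of_lt h)
  have hperm : out.Perm (PySem.Set.ofList F) :=
    (List.perm_ext_iff_of_nodup hnodup (PySem.Set.nodup_ofList F)).mpr hmem
  exact PySem.List.sorted_eq_of_perm_of_pairwise_lt (PySem.Set.ofList F) out (fun x => x) hperm h1
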